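-- pv_equiv track=rewrite | github.com/vnknowledge2014/file_translated_app | backend/app/agent/reconstructor/xlsx.py | _safe_replace
-- ===== SOURCE A (Python) =====
-- def _safe_replace(t: str, search: str, replacement: str) -> str:
--     """Replace `search` in `t`, but skip occurrences preceded by ] (external refs)."""
--     out: list[str] = []
--     i = 0
--     while i < len(t):
--         idx = t.find(search, i)
--         if idx == -1:
--             out.append(t[i:])
--             break
--         if idx > 0 and t[idx - 1] == ']':
--             out.append(t[i:idx + len(search)])
--         else:
--             out.append(t[i:idx])
--             out.append(replacement)
--         i = idx + len(search)
--     return ''.join(out)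
-- ===== SOURCE B (Python) =====
-- def _safe_replace(t: str, search: str, replacement: str) -> str:
--     """Split on `search` and rejoin, keeping matches whose preceding original char is ']'."""
--     parts = t.split(search)
--     out = [parts[0]]
--     prev = parts[0][-1] if parts[0] else None
--     for seg in parts[1:]:
--         out.append(search if prev == ']' else replacement)
--         out.append(seg)
--         prev = seg[-1] if seg else search[-1]
--     return ''.join(out)
-- ===== Notes on version B (the rewrite author's own statement) =====
-- stated objective: alternative
-- what changed: Replaces the index-based find-scan loop with an up-front t.split(search) followed by one rejoin pass over the segments, tracking the original character before each boundary (segment end, or search[-1] on adjacent matches).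
-- outside the precondition, e.g. on _safe_replace('', '', ''): A returns '', B raises ValueError
import Mathlib
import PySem

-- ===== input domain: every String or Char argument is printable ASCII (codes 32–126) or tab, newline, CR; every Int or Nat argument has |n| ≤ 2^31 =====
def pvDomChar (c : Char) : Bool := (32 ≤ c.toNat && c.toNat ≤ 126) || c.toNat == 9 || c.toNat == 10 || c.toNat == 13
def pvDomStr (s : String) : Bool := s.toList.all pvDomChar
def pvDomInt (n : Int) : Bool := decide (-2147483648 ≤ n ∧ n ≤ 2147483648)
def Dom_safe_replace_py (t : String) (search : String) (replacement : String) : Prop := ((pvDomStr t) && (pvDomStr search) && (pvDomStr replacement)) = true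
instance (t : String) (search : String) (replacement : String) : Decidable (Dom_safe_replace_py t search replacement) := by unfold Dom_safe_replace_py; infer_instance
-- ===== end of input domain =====

-- B replaces A's index-based find-scan loop by split-on-search plus one rejoin pass over the segments
-- (tracking the original character before each boundary); same return value whenever search ≠ "".

-- ===== PORT A =====
-- A's while loop; fuel = len(t)+1 suffices since i advances by len(search) ≥ 1 per iteration (Pre_ excludes search = "").
def pvGoA (t search repl : List Char) : Nat → Nat → List (List Char) → List (List Char)
  | 0, _, out => out
  | fuel+1, i, out =>
    if i < t.length then
      let idx : Int := PySem.Chars.findFrom t search (i : Int)   -- idx = t.find(search, i)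
      if idx = -1 then
        out ++ [PySem.List.slice t (some (i : Int)) none]        -- out.append(t[i:]); break
      else if 0 < idx ∧ PySem.List.pyGetD t (idx - 1) ' ' = ']' then   -- idx > 0 and t[idx-1] == ']'
        pvGoA t search repl fuel (idx.toNat + search.length)
          (out ++ [PySem.List.slice t (some (i : Int)) (some (idx + (search.length : Int)))])
      else
        pvGoA t search repl fuel (idx.toNat + search.length)
          (out ++ [PySem.List.slice t (some (i : Int)) (some idx), repl])
    else out

def safe_replace_py (t : String) (search : String) (replacement : String) : String :=
  String.ofList (pvGoA t.toList search.toList replacement.toList (t.toList.length + 1) 0 []).flatten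

-- ===== PORT B =====
-- one pass over parts = t.split(search): emit search if the original char before the boundary is ']', else replacement.
def pvRejoin (search repl : List Char) : List (List Char) → Option Char → List Char
  | [], _ => []
  | seg :: rest, prev =>
    (if prev = some ']' then search else repl) ++ seg ++
      pvRejoin search repl rest (if seg = [] then search.getLast? else seg.getLast?)

def safe_replace_py_alt (t : String) (search : String) (replacement : String) : String :=
  match PySem.Chars.splitOn t.toList search.toList with
  | [] => ""   -- unreachable: split never returns an empty list
  | p0 :: rest => String.ofList (p0 ++ pvRejoin search.toList replacement.toList rest p0.getLast?)

-- ===== PRECONDITION & SPEC =====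
-- Pre_ excludes search = "" only: there B's str.split raises ValueError while A diverges for nonempty t
-- (its find-loop never advances i) and returns "" only in the degenerate case t = "".
def Pre_safe_replace_py (t : String) (search : String) (replacement : String) : Prop := search ≠ ""
instance (t : String) (search : String) (replacement : String) : Decidable (Pre_safe_replace_py t search replacement) := by unfold Pre_safe_replace_py; infer_instance
def pvWitness_safe_replace_py : String × String × String := ("ab=[R]= cd", "=", "#")

def Spec_safe_replace_py (t : String) (search : String) (replacement : String) (out : String) : Prop := out = safe_replace_py_alt t search replacement
instance (t : String) (search : String) (replacement : String) (out : String) : Decidable (Spec_safe_replace_py t search replacement out) := by unfold Spec_safe_replace_py; infer_instance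

-- ===== CLAIM (what is proved, stated in full; the proofs are below) =====
def Claim_equal_safe_replace_py : Prop := ∀ (t : String) (search : String) (replacement : String), Dom_safe_replace_py t search replacement → Pre_safe_replace_py t search replacement → Spec_safe_replace_py t search replacement (safe_replace_py t search replacement)

-- ===== LEMMAS AND PROOFS =====

-- proof-side: Python split for a nonempty separator, phrased through `find` (the shape A's scan follows)
def pvSplitF (sep : List Char) : Nat → List Char → List (List Char)
  | 0, s => [s]
  | fuel+1, s =>
    let f := PySem.Chars.find s sep
    if f = -1 then [s]
    else s.take f.toNat :: pvSplitF sep fuel (s.drop (f.toNat + sep.length))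

-- proof-side: B's whole computation on a suffix, given the original char just before the suffix
def pvBSide (search repl : List Char) (fuel : Nat) (s : List Char) (prev : Option Char) : List Char :=
  match pvSplitF search fuel s with
  | [] => []
  | p0 :: rest => p0 ++ pvRejoin search repl rest (if p0 = [] then prev else p0.getLast?)

lemma pv_find_nil (sep : List Char) (hs : sep ≠ []) : PySem.Chars.find [] sep = -1 := by
  simp [PySem.Chars.find, PySem.Chars.find.go, hs]

lemma pv_go_shift (sep : List Char) (hs : sep ≠ []) :
    ∀ l (k : Nat), PySem.Chars.find.go sep l k
      = if PySem.Chars.find l sep = -1 then -1 else PySem.Chars.find l sep + k := by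
  intro l
  induction l with
  | nil => intro k; simp [PySem.Chars.find, PySem.Chars.find.go, hs]
  | cons c rest ih =>
    intro k
    by_cases hp : sep.isPrefixOf (c :: rest) = true
    · simp [PySem.Chars.find, PySem.Chars.find.go, hp]
    · have hp' : sep.isPrefixOf (c :: rest) = false := by rw [Bool.eq_false_iff]; exact hp
      have h0 : PySem.Chars.find (c :: rest) sep = PySem.Chars.find.go sep rest 1 := by
        simp [PySem.Chars.find, PySem.Chars.find.go, hp']
      have hgo : ∀ m : Nat, PySem.Chars.find.go sep (c :: rest) m = PySem.Chars.find.go sep rest (m+1) := by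
        intro m; conv_lhs => rw [PySem.Chars.find.go]
        simp [hp']
      have hneg : -1 ≤ PySem.Chars.find rest sep := PySem.Chars.neg_one_le_find rest sep
      rw [hgo k, ih (k+1), h0, ih 1]
      by_cases hm : PySem.Chars.find rest sep = -1
      · simp [hm]
      · have : ¬ (PySem.Chars.find rest sep + 1 = -1) := by omega
        simp [hm, this]; omega

lemma pv_find_prefix (sep l : List Char) (hs : sep ≠ []) (hp : sep.isPrefixOf l = true) :
    PySem.Chars.find l sep = 0 := by
  cases l with
  | nil =>
    exfalso
    have := List.isPrefixOf_iff_prefix.mp hp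
    simp at this; exact hs this
  | cons c rest => simp [PySem.Chars.find, PySem.Chars.find.go, hp]

lemma pv_splitF_ne_nil (sep : List Char) (fuel : Nat) (s : List Char) : pvSplitF sep fuel s ≠ [] := by
  cases fuel with
  | zero => simp [pvSplitF]
  | succ n =>
    simp only [pvSplitF]
    split <;> simp

lemma pv_splitF_fuel (sep : List Char) (hs : sep ≠ []) :
    ∀ f1 f2 s, s.length < f1 → s.length < f2 → pvSplitF sep f1 s = pvSplitF sep f2 s := by
  intro f1
  induction f1 with
  | zero => intro f2 s h1 _; omega
  | succ m ih =>
    intro f2 s h1 h2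
    cases f2 with
    | zero => omega
    | succ m2 =>
      simp only [pvSplitF]
      by_cases hf : PySem.Chars.find s sep = -1
      · simp [hf]
      · have hf0 : 0 ≤ PySem.Chars.find s sep := by
          have := PySem.Chars.neg_one_le_find s sep; omega
        have hfin : sep <+: s.drop (PySem.Chars.find s sep).toNat :=
          (PySem.Chars.find_spec hf0).1
        have hlen : (PySem.Chars.find s sep).toNat + sep.length ≤ s.length := by
          have h2 := hfin.length_le
          have h3 := PySem.Chars.find_le_length s sep
          rw [List.length_drop] at h2
          omega
        have hsep : 1 ≤ sep.length := by
          cases sep with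
          | nil => exact absurd rfl hs
          | cons _ _ => simp
        have hd : (s.drop ((PySem.Chars.find s sep).toNat + sep.length)).length < m := by
          simp; omega
        have hd2 : (s.drop ((PySem.Chars.find s sep).toNat + sep.length)).length < m2 := by
          simp; omega
        simp [hf, ih _ _ hd hd2]

lemma pv_find_cons (sep : List Char) (c : Char) (rest : List Char) (hs : sep ≠ [])
    (hnp : sep.isPrefixOf (c :: rest) = false) :
    PySem.Chars.find (c :: rest) sep
      = if PySem.Chars.find rest sep = -1 then -1 else PySem.Chars.find rest sep + 1 := by
  have h0 : PySem.Chars.find (c :: rest) sep = PySem.Chars.find.go sep rest 1 := by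
    simp [PySem.Chars.find, PySem.Chars.find.go, hnp]
  rw [h0, pv_go_shift sep hs rest 1]
  norm_num

lemma pv_splitF_none (sep : List Char) (fuel : Nat) (s : List Char)
    (hm : PySem.Chars.find s sep = -1) : pvSplitF sep fuel s = [s] := by
  cases fuel with
  | zero => simp [pvSplitF]
  | succ m => simp [pvSplitF, hm]

lemma pv_splitF_step (sep : List Char) (hs : sep ≠ []) (fuel : Nat) (s : List Char)
    (h : s.length < fuel) (hm : PySem.Chars.find s sep ≠ -1) :
    pvSplitF sep fuel s
      = s.take (PySem.Chars.find s sep).toNat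
        :: pvSplitF sep fuel (s.drop ((PySem.Chars.find s sep).toNat + sep.length)) := by
  have hsep : 1 ≤ sep.length := by
    cases sep with
    | nil => exact absurd rfl hs
    | cons _ _ => simp
  have hf0 : 0 ≤ PySem.Chars.find s sep := by
    have := PySem.Chars.neg_one_le_find s sep; omega
  have hfin : sep <+: s.drop (PySem.Chars.find s sep).toNat := (PySem.Chars.find_spec hf0).1
  have h2 := hfin.length_le
  rw [List.length_drop] at h2
  have h3 := PySem.Chars.find_le_length s sep
  cases fuel with
  | zero => omega
  | succ m =>
    have hunf : pvSplitF sep (m+1) s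
        = if PySem.Chars.find s sep = -1 then [s]
          else s.take (PySem.Chars.find s sep).toNat
            :: pvSplitF sep m (s.drop ((PySem.Chars.find s sep).toNat + sep.length)) := rfl
    rw [hunf, if_neg hm]
    congr 1
    apply pv_splitF_fuel sep hs
    · rw [List.length_drop]; omega
    · rw [List.length_drop]; omega

lemma pv_splitOn_go_eq (sep : List Char) (hs : sep ≠ []) :
    ∀ fuel l cur acc, l.length < fuel →
      PySem.Chars.splitOn.go sep fuel l cur acc
        = acc.reverse ++ (match pvSplitF sep fuel l with
            | [] => []
            | p0 :: rest => (cur.reverse ++ p0) :: rest) := by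
  have hsep : 1 ≤ sep.length := by
    cases sep with
    | nil => exact absurd rfl hs
    | cons _ _ => simp
  intro fuel
  induction fuel with
  | zero => intro l cur acc h; omega
  | succ m ih =>
    intro l cur acc h
    cases l with
    | nil =>
      rw [PySem.Chars.splitOn.go] <;> simp [pvSplitF, pv_find_nil sep hs]
    | cons c rest =>
      by_cases hp : sep.isPrefixOf (c :: rest) = true
      · have hstep : PySem.Chars.splitOn.go sep (m+1) (c :: rest) cur acc
            = PySem.Chars.splitOn.go sep m (List.drop sep.length (c :: rest)) [] (cur.reverse :: acc) := by
          rw [PySem.Chars.splitOn.go] <;> simp [hp]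
        have hlen : (List.drop sep.length (c :: rest)).length < m := by
          simp; simp at h; omega
        rw [hstep, ih _ _ _ hlen]
        have hf : PySem.Chars.find (c :: rest) sep = 0 := pv_find_prefix sep _ hs hp
        have hsplit : pvSplitF sep (m+1) (c :: rest)
            = [] :: pvSplitF sep m (List.drop sep.length (c :: rest)) := by
          simp [pvSplitF, hf]
        rw [hsplit]
        cases hq : pvSplitF sep m (List.drop sep.length (c :: rest)) with
        | nil => exact absurd hq (pv_splitF_ne_nil sep m _)
        | cons q0 qrest => simp
      · have hp' : sep.isPrefixOf (c :: rest) = false := by rw [Bool.eq_false_iff]; exact hp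
        have hstep : PySem.Chars.splitOn.go sep (m+1) (c :: rest) cur acc
            = PySem.Chars.splitOn.go sep m rest (c :: cur) acc := by
          rw [PySem.Chars.splitOn.go] <;> simp [hp']
        have hlen : rest.length < m := by simp at h; omega
        rw [hstep, ih _ _ _ hlen]
        have hf := pv_find_cons sep c rest hs hp'
        by_cases hm : PySem.Chars.find rest sep = -1
        · rw [pv_splitF_none sep m rest hm,
            pv_splitF_none sep (m+1) (c :: rest) (by rw [hf, if_pos hm])]
          simp
        · have hf0 : 0 ≤ PySem.Chars.find rest sep := by
            have := PySem.Chars.neg_one_le_find rest sep; omega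
          have hne : PySem.Chars.find (c :: rest) sep ≠ -1 := by rw [hf, if_neg hm]; omega
          have hval : PySem.Chars.find (c :: rest) sep = PySem.Chars.find rest sep + 1 := by
            rw [hf, if_neg hm]
          have htn : (PySem.Chars.find (c :: rest) sep).toNat
              = (PySem.Chars.find rest sep).toNat + 1 := by rw [hval]; omega
          rw [pv_splitF_step sep hs (m+1) (c :: rest) (by simpa using h) hne,
            pv_splitF_step sep hs m rest hlen hm, htn]
          simp only [List.take_succ_cons]
          have hfuel : pvSplitF sep (m+1) (rest.drop ((PySem.Chars.find rest sep).toNat + sep.length))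
              = pvSplitF sep m (rest.drop ((PySem.Chars.find rest sep).toNat + sep.length)) := by
            apply pv_splitF_fuel sep hs <;> rw [List.length_drop] <;> omega
          have hd : List.drop ((PySem.Chars.find rest sep).toNat + 1 + sep.length) (c :: rest)
              = List.drop ((PySem.Chars.find rest sep).toNat + sep.length) rest := by
            rw [show (PySem.Chars.find rest sep).toNat + 1 + sep.length
                = ((PySem.Chars.find rest sep).toNat + sep.length) + 1 by omega,
              List.drop_succ_cons]
          rw [hd, hfuel]
          simp

lemma pv_splitOn_eq (s sep : List Char) (hs : sep ≠ []) :
    PySem.Chars.splitOn s sep = pvSplitF sep (s.length + 1) s := by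
  rw [PySem.Chars.splitOn, pv_splitOn_go_eq sep hs (s.length + 1) s [] [] (by omega)]
  cases hq : pvSplitF sep (s.length + 1) s with
  | nil => exact absurd hq (pv_splitF_ne_nil sep _ _)
  | cons q0 qrest => simp


lemma pv_main (t search repl : List Char) (hs : search ≠ []) :
    ∀ fuel i out, i ≤ t.length → t.length - i < fuel →
      (pvGoA t search repl fuel i out).flatten
        = out.flatten ++ pvBSide search repl fuel (t.drop i) ((t.take i).getLast?) := by
  have hsep : 1 ≤ search.length := by
    cases search with
    | nil => exact absurd rfl hs
    | cons _ _ => simp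
  intro fuel
  induction fuel with
  | zero => intro i out h1 h2; omega
  | succ m ih =>
    intro i out h1 h2
    by_cases hi : i < t.length
    · -- loop body runs
      have hff := PySem.Chars.findFrom_natCast t search i h1
      by_cases hm0 : PySem.Chars.find (t.drop i) search = -1
      · -- no further occurrence: append the tail and stop
        have hidx : PySem.Chars.findFrom t search (i : Int) = -1 := by rw [hff, if_pos hm0]
        have hgo : pvGoA t search repl (m+1) i out
            = out ++ [PySem.List.slice t (some (i : Int)) none] := by
          simp only [pvGoA, if_pos hi, hidx]
          simp
        rw [hgo, PySem.List.slice_from_natCast]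
        rw [pvBSide, pv_splitF_none search (m+1) _ hm0]
        simp [pvRejoin]
      · -- an occurrence at offset k of the suffix
        have hf0 : 0 ≤ PySem.Chars.find (t.drop i) search := by
          have := PySem.Chars.neg_one_le_find (t.drop i) search; omega
        set k : Nat := (PySem.Chars.find (t.drop i) search).toNat with hk
        have hkval : (PySem.Chars.find (t.drop i) search) = (k : Int) := by omega
        have hfin : search <+: (t.drop i).drop k := (PySem.Chars.find_spec hf0).1
        rw [List.drop_drop] at hfin
        obtain ⟨z, hz⟩ := hfin
        have hzlen : i + k + search.length + z.length = t.length := by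
          have := congrArg List.length hz
          simp at this
          omega
        have hik : i + k < t.length := by omega
        have hidx : PySem.Chars.findFrom t search (i : Int) = ((i + k : Nat) : Int) := by
          rw [hff, if_neg hm0, hkval]; push_cast; ring
        have hidxne : ¬ (PySem.Chars.findFrom t search (i : Int) = -1) := by
          rw [hidx]; omega
        -- the character before the occurrence, read two ways
        have htake : t.take (i + k) = t.take i ++ (t.drop i).take k := List.take_add
        have hprev : (t.take (i + k)).getLast?
            = (if (t.drop i).take k = [] then (t.take i).getLast? else ((t.drop i).take k).getLast?) := by
          rw [htake, List.getLast?_append]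
          cases hq : ((t.drop i).take k).getLast? with
          | none =>
            have h0 : (t.drop i).take k = [] := List.getLast?_eq_none_iff.mp hq
            simp [h0]
          | some a =>
            have hne : ¬ (t.drop i).take k = [] := by
              intro h0; rw [h0] at hq; simp at hq
            simp [hq, hne]
        have hcond : (0 < PySem.Chars.findFrom t search (i : Int)
              ∧ PySem.List.pyGetD t (PySem.Chars.findFrom t search (i : Int) - 1) ' ' = ']')
            ↔ (t.take (i + k)).getLast? = some ']' := by
          rw [hidx]
          by_cases hik0 : i + k = 0
          · simp [hik0]
          · have h1' : ((i + k : Nat) : Int) - 1 = ((i + k - 1 : Nat) : Int) := by omega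
            have hlt : i + k - 1 < t.length := by omega
            rw [h1', PySem.List.pyGetD_natCast, List.getD_eq_getElem t ' ' hlt]
            have hlast : (t.take (i + k)).getLast? = some t[i + k - 1] := by
              rw [List.getLast?_eq_getElem?]
              have hlen : (t.take (i + k)).length = i + k := by simp; omega
              rw [hlen, List.getElem?_take, if_pos (by omega : i + k - 1 < i + k),
                List.getElem?_eq_getElem hlt]
            rw [hlast]
            constructor
            · rintro ⟨-, h⟩; rw [h]
            · intro h; exact ⟨by omega, by simpa using h⟩
        -- slices
        have hdropik : t.drop (i + k) = search ++ z := hz.symm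
        have hsliceB : PySem.List.slice t (some (i : Int)) (some (PySem.Chars.findFrom t search (i : Int)))
            = (t.drop i).take k := by
          rw [hidx, PySem.List.slice_natCast]
          congr 1; omega
        have hsliceA : PySem.List.slice t (some (i : Int))
              (some (PySem.Chars.findFrom t search (i : Int) + (search.length : Int)))
            = (t.drop i).take k ++ search := by
          rw [hidx]
          have : ((i + k : Nat) : Int) + (search.length : Int) = ((i + k + search.length : Nat) : Int) := by
            push_cast; ring
          rw [this, PySem.List.slice_natCast]
          have h2' : i + k + search.length - i = k + search.length := by omega
          rw [h2', List.take_add, List.drop_drop]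
          congr 1
          rw [hdropik]
          exact List.take_left
        -- the next loop position
        have htoNat : (PySem.Chars.findFrom t search (i : Int)).toNat + search.length
            = i + k + search.length := by rw [hidx]; omega
        have hdropnext : (t.drop i).drop (k + search.length) = t.drop (i + k + search.length) := by
          rw [List.drop_drop]; congr 1 <;> omega
        have hz' : t.drop (i + k + search.length) = z := by
          have hsplit2 : t.drop (i + k + search.length)
              = List.drop search.length (t.drop (i + k)) := by
            rw [List.drop_drop]
          rw [hsplit2, hdropik, List.drop_left]
        have htakenext : (t.take (i + k + search.length)).getLast? = search.getLast? := by
          rw [show i + k + search.length = (i + k) + search.length by omega, List.take_add, hdropik,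
            List.take_left, List.getLast?_append]
          cases hq : search.getLast? with
          | none => exact absurd (List.getLast?_eq_none_iff.mp hq) hs
          | some a => simp
        -- unfold B's side once
        have hstep := pv_splitF_step search hs (m+1) (t.drop i) (by simp; omega) hm0
        rw [← hk] at hstep
        have hslen' : ((t.drop i).drop (k + search.length)).length < m := by
          simp; omega
        have hfuel : pvSplitF search (m+1) ((t.drop i).drop (k + search.length))
            = pvSplitF search m ((t.drop i).drop (k + search.length)) := by
          apply pv_splitF_fuel search hs <;> omega
        have hbs : pvBSide search repl (m+1) (t.drop i) ((t.take i).getLast?)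
            = (t.drop i).take k
              ++ pvRejoin search repl (pvSplitF search m ((t.drop i).drop (k + search.length)))
                  (if (t.drop i).take k = [] then (t.take i).getLast? else ((t.drop i).take k).getLast?) := by
          rw [pvBSide, hstep, hfuel]
        -- IH applied at the next position
        have hih := ih (i + k + search.length) (out ++ [PySem.List.slice t (some (i : Int))
              (some (PySem.Chars.findFrom t search (i : Int) + (search.length : Int)))])
            (by omega) (by omega)
        have hih2 := ih (i + k + search.length) (out ++ [PySem.List.slice t (some (i : Int))
              (some (PySem.Chars.findFrom t search (i : Int))), repl])
            (by omega) (by omega)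
        -- case split on A's condition
        by_cases hC : (0 < PySem.Chars.findFrom t search (i : Int)
            ∧ PySem.List.pyGetD t (PySem.Chars.findFrom t search (i : Int) - 1) ' ' = ']')
        · have hgo : pvGoA t search repl (m+1) i out
              = pvGoA t search repl m (i + k + search.length)
                  (out ++ [PySem.List.slice t (some (i : Int))
                    (some (PySem.Chars.findFrom t search (i : Int) + (search.length : Int)))]) := by
            simp only [pvGoA, if_pos hi, if_neg hidxne, if_pos hC, htoNat]
          rw [hgo, hih, hbs]
          have hprevC : ((if (t.drop i).take k = [] then (t.take i).getLast?
              else ((t.drop i).take k).getLast?)) = some ']' := by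
            rw [← hprev]; exact hcond.mp hC
          -- unfold pvBSide on the tail
          cases hq : pvSplitF search m ((t.drop i).drop (k + search.length)) with
          | nil => exact absurd hq (pv_splitF_ne_nil search m _)
          | cons q0 qrest =>
            have hbtail : pvBSide search repl m (t.drop (i + k + search.length))
                ((t.take (i + k + search.length)).getLast?)
                = q0 ++ pvRejoin search repl qrest
                    (if q0 = [] then search.getLast? else q0.getLast?) := by
              rw [pvBSide, ← hdropnext, hq, htakenext]
            rw [hbtail, hsliceA, pvRejoin, if_pos hprevC]
            simp
        · have hgo : pvGoA t search repl (m+1) i out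
              = pvGoA t search repl m (i + k + search.length)
                  (out ++ [PySem.List.slice t (some (i : Int))
                    (some (PySem.Chars.findFrom t search (i : Int))), repl]) := by
            simp only [pvGoA, if_pos hi, if_neg hidxne, if_neg hC, htoNat]
          rw [hgo, hih2, hbs]
          have hprevC : ¬ ((if (t.drop i).take k = [] then (t.take i).getLast?
              else ((t.drop i).take k).getLast?)) = some ']' := by
            rw [← hprev]; exact fun h => hC (hcond.mpr h)
          cases hq : pvSplitF search m ((t.drop i).drop (k + search.length)) with
          | nil => exact absurd hq (pv_splitF_ne_nil search m _)
          | cons q0 qrest =>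
            have hbtail : pvBSide search repl m (t.drop (i + k + search.length))
                ((t.take (i + k + search.length)).getLast?)
                = q0 ++ pvRejoin search repl qrest
                    (if q0 = [] then search.getLast? else q0.getLast?) := by
              rw [pvBSide, ← hdropnext, hq, htakenext]
            rw [hbtail, hsliceB, pvRejoin, if_neg hprevC]
            simp
    · -- i = t.length: loop exits, both sides empty
      have hgo : pvGoA t search repl (m+1) i out = out := by
        simp [pvGoA, hi]
      have hdrop : t.drop i = [] := by
        rw [List.drop_eq_nil_iff]; omega
      rw [hgo, hdrop, pvBSide, pv_splitF_none search (m+1) [] (pv_find_nil search hs)]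
      simp [pvRejoin]

-- ===== VERDICT (by name: the statement is the Claim_ definition above) =====
theorem safe_replace_py_spec : Claim_equal_safe_replace_py := by
  intro t search replacement _ hpre
  unfold Spec_safe_replace_py
  have hs : search.toList ≠ [] := by
    intro h0
    exact hpre (by rw [← String.ofList_toList (s := search), h0])
  unfold safe_replace_py safe_replace_py_alt
  rw [pv_splitOn_eq t.toList search.toList hs]
  have hm := pv_main t.toList search.toList replacement.toList hs (t.toList.length + 1) 0 []
    (by omega) (by omega)
  simp only [List.drop_zero, List.take_zero, List.getLast?_nil, List.flatten_nil,
    List.nil_append] at hm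
  cases hq : pvSplitF search.toList (t.toList.length + 1) t.toList with
  | nil => exact absurd hq (pv_splitF_ne_nil search.toList _ _)
  | cons p0 rest =>
    rw [hm, pvBSide, hq]
    by_cases hp0 : p0 = []
    · simp [hp0]
    · have : p0.getLast? ≠ none := fun h => hp0 (List.getLast?_eq_none_iff.mp h)
      simp [hp0]
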